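-- pv_equiv track=rewrite | github.com/adityakumar-09/Infosys-Springboard-Programming-Fundamentals-using-Python | Part 2/2.Assignment on Function Arguments-Pairs of numbers.py | find_pairs_of_numbers
-- ===== SOURCE A (Python) =====
-- def find_pairs_of_numbers(num_list, n):
--     seen = set()
--     pairs = set()
--
--     for num in num_list:
--         complement = n - num
--         if complement in seen:
--             pairs.add(tuple(sorted((num, complement))))
--         seen.add(num)
--
--     return len(pairs)
-- ===== SOURCE B (Python) =====
-- def find_pairs_of_numbers(num_list, n):
--     present = set(num_list)
--     count = 0
--     for v in present:
--         if 2 * v < n and (n - v) in present: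
--             count += 1
--     if n % 2 == 0 and num_list.count(n // 2) >= 2:
--         count += 1
--     return count
-- ===== Notes on version B (the rewrite author's own statement) =====
-- stated objective: alternative
-- what changed: B tabulates the distinct values once, then counts each distinct v with 2v < n whose complement is present (plus the n/2 self-pair when that value occurs twice), instead of streaming over the list while accumulating a set of sorted pair tuples.
import Mathlib
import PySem

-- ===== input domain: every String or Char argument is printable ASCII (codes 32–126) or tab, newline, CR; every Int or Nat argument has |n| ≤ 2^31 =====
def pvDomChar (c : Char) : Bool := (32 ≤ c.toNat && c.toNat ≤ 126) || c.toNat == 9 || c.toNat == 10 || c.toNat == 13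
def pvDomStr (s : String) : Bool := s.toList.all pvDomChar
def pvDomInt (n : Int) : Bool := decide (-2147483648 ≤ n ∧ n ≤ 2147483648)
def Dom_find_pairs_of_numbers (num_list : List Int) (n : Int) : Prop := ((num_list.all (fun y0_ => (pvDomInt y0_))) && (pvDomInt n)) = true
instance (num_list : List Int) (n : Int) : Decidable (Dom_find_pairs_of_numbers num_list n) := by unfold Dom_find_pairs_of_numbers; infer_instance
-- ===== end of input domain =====

-- B counts complement-present distinct values (plus the n/2 self-pair when it occurs twice) over the set of
-- values, instead of streaming over the list while accumulating a set of sorted pair tuples; objective: alternative.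

-- ===== PORT A =====
-- loop body of A: complement test against `seen`, add tuple(sorted((num, complement))) to `pairs`, add num to `seen`
def pvStepA (n : Int) (st : PySem.Set Int × PySem.Set (Int × Int)) (num : Int) :
    PySem.Set Int × PySem.Set (Int × Int) :=
  let complement := n - num
  if PySem.Set.contains st.1 complement then
    (PySem.Set.add st.1 num,
     PySem.Set.add st.2 (if complement < num then (complement, num) else (num, complement)))
  else
    (PySem.Set.add st.1 num, st.2)

def find_pairs_of_numbers (num_list : List Int) (n : Int) : Int :=
  PySem.Set.len (num_list.foldl (pvStepA n) (PySem.Set.empty, PySem.Set.empty)).2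

-- ===== PORT B =====
def find_pairs_of_numbers_alt (num_list : List Int) (n : Int) : Int :=
  let present : PySem.Set Int := PySem.Set.ofList num_list
  let count : Int := present.foldl
    (fun c v => if 2 * v < n ∧ PySem.Set.contains present (n - v) then c + 1 else c) 0
  if PySem.Int.mod n 2 = 0 ∧ 2 ≤ num_list.count (PySem.Int.floordiv n 2) then count + 1 else count

-- ===== PRECONDITION & SPEC =====
def Spec_find_pairs_of_numbers (num_list : List Int) (n : Int) (out : Int) : Prop := out = find_pairs_of_numbers_alt num_list n
instance (num_list : List Int) (n : Int) (out : Int) : Decidable (Spec_find_pairs_of_numbers num_list n out) := by unfold Spec_find_pairs_of_numbers; infer_instance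

-- ===== CLAIM (what is proved, stated in full; the proofs are below) =====
def Claim_equal_find_pairs_of_numbers : Prop := ∀ (num_list : List Int) (n : Int), Dom_find_pairs_of_numbers num_list n → Spec_find_pairs_of_numbers num_list n (find_pairs_of_numbers num_list n)

-- ===== LEMMAS AND PROOFS =====

-- Characterisation of A's `pairs` set after processing L: exactly the sorted pairs (a, b) with
-- a + b = n whose members occur in L, a self-pair requiring two occurrences.
def pvGood (n : Int) (L : List Int) (p : Int × Int) : Prop :=
  p.1 + p.2 = n ∧ p.1 ≤ p.2 ∧ p.1 ∈ L ∧ p.2 ∈ L ∧ (p.1 = p.2 → 2 ≤ L.count p.1)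

lemma pvCount_append_singleton (x num : Int) (P : List Int) :
    List.count x (P ++ [num]) = List.count x P + (if x = num then 1 else 0) := by
  by_cases h : x = num <;> simp [List.count_append, List.count_singleton', h] <;> omega

lemma pvGood_append_singleton (n : Int) (P : List Int) (num : Int) (p : Int × Int) :
    pvGood n (P ++ [num]) p ↔
      (pvGood n P p ∨ ((n - num) ∈ P ∧
        p = (if n - num < num then (n - num, num) else (num, n - num)))) := by
  obtain ⟨a, b⟩ := p
  simp only [pvGood, List.mem_append, List.mem_singleton, pvCount_append_singleton]
  constructor
  · rintro ⟨hsum, hle, ha, hb, hdiag⟩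
    by_cases haP : a ∈ P
    · by_cases hbP : b ∈ P
      · by_cases hab : a = b
        · subst hab
          by_cases hc2 : 2 ≤ P.count a
          · exact Or.inl ⟨hsum, hle, haP, hbP, fun _ => hc2⟩
          · have h1 : 1 ≤ P.count a := List.count_pos_iff.2 haP
            have h := hdiag rfl
            have hna : a = num := by by_contra hne; simp [hne] at h; omega
            subst hna
            have he : n - a = a := by omega
            have hlt : ¬ n - a < a := by omega
            refine Or.inr ⟨by rw [he]; exact haP, by simp [hlt]; omega⟩
        · exact Or.inl ⟨hsum, hle, haP, hbP, fun h => absurd h hab⟩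
      · have hbn : b = num := hb.resolve_left hbP
        subst hbn
        have haneq : a = n - b := by omega
        refine Or.inr ⟨by rw [← haneq]; exact haP, ?_⟩
        by_cases hlt : n - b < b
        · simp [hlt]; omega
        · simp [hlt]; omega
    · have han : a = num := ha.resolve_left haP
      subst han
      have hbeq : b = n - a := by omega
      have hbP' : b ∈ P := by
        rcases hb with h | h
        · exact h
        · exfalso
          subst h
          have h2 := hdiag rfl
          rw [if_pos rfl] at h2
          exact haP (List.count_pos_iff.1 (by omega))
      have hlt : ¬ n - a < a := by omega
      exact Or.inr ⟨by rw [← hbeq]; exact hbP', by simp [hlt]; omega⟩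
  · rintro (⟨hsum, hle, ha, hb, hdiag⟩ | ⟨hmem, hp⟩)
    · exact ⟨hsum, hle, Or.inl ha, Or.inl hb, fun h => by have := hdiag h; omega⟩
    · by_cases hlt : n - num < num
      · simp [hlt] at hp
        obtain ⟨h1, h2⟩ := hp
        subst h1; subst h2
        exact ⟨by omega, by omega, Or.inl hmem, Or.inr rfl, fun h => by omega⟩
      · simp [hlt] at hp
        obtain ⟨h1, h2⟩ := hp
        subst h1; subst h2
        refine ⟨by omega, by omega, Or.inr rfl, Or.inl hmem, fun h => ?_⟩
        rw [if_pos rfl]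
        have hm : a ∈ P := by rwa [← h] at hmem
        have := List.count_pos_iff.2 hm
        omega

lemma pvInvA (n : Int) (L : List Int) : ∀ (P : List Int) (pairs : PySem.Set (Int × Int)),
    pairs.Nodup → (∀ p, p ∈ pairs ↔ pvGood n P p) →
    (L.foldl (pvStepA n) (PySem.Set.ofList P, pairs)).2.Nodup ∧
    (∀ p, p ∈ (L.foldl (pvStepA n) (PySem.Set.ofList P, pairs)).2 ↔ pvGood n (P ++ L) p) := by
  induction L with
  | nil =>
    intro P pairs hnd hmem
    simp only [List.foldl_nil, List.append_nil]
    exact ⟨hnd, hmem⟩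
  | cons num L ih =>
    intro P pairs hnd hmem
    rw [List.foldl_cons]
    by_cases hc : (n - num) ∈ P
    · have hstep : pvStepA n (PySem.Set.ofList P, pairs) num =
          (PySem.Set.ofList (P ++ [num]),
           PySem.Set.add pairs (if n - num < num then (n - num, num) else (num, n - num))) := by
        unfold pvStepA
        rw [if_pos (by simp [PySem.Set.contains_iff, PySem.Set.mem_ofList, hc])]
        rw [PySem.Set.ofList_append_singleton]
      rw [hstep]
      have h := ih (P ++ [num])
        (PySem.Set.add pairs (if n - num < num then (n - num, num) else (num, n - num)))
        (PySem.Set.nodup_add pairs _ hnd)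
        (by
          intro p
          rw [PySem.Set.mem_add, pvGood_append_singleton, hmem]
          constructor
          · rintro (h | h)
            · exact Or.inl h
            · exact Or.inr ⟨hc, h⟩
          · rintro (h | ⟨_, h⟩)
            · exact Or.inl h
            · exact Or.inr h)
      simp only [List.append_assoc, List.singleton_append] at h
      exact h
    · have hstep : pvStepA n (PySem.Set.ofList P, pairs) num =
          (PySem.Set.ofList (P ++ [num]), pairs) := by
        unfold pvStepA
        rw [if_neg (by simp [PySem.Set.contains_iff, PySem.Set.mem_ofList, hc])]
        rw [PySem.Set.ofList_append_singleton]
      rw [hstep]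
      have h := ih (P ++ [num]) pairs hnd
        (by
          intro p
          rw [pvGood_append_singleton, hmem]
          constructor
          · exact Or.inl
          · rintro (h | ⟨h, _⟩)
            · exact h
            · exact absurd h hc)
      simp only [List.append_assoc, List.singleton_append] at h
      exact h

lemma pvSingleton {α : Type} (l : List α) (x : α) (hnd : l.Nodup)
    (hall : ∀ y ∈ l, y = x) (hx : x ∈ l) : l.length = 1 := by
  cases l with
  | nil => cases hx
  | cons y t =>
    have hy : y = x := hall y (List.mem_cons_self)
    have ht : t = [] := by
      cases t with
      | nil => rfl
      | cons z u =>
        exfalso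
        have hz : z = x := hall z (by simp)
        have : y ∈ z :: u := by rw [hy, ← hz]; exact List.mem_cons_self
        exact (List.nodup_cons.1 hnd).1 this
    simp [ht]

lemma pvLen_eq_alt (n : Int) (L : List Int) (F : List (Int × Int))
    (hnd : F.Nodup) (hmem : ∀ p, p ∈ F ↔ pvGood n L p) :
    (F.length : Int) = find_pairs_of_numbers_alt L n := by
  unfold find_pairs_of_numbers_alt
  simp only
  rw [PySem.List.foldl_ite_add_one]
  rw [List.length_eq_countP_add_countP (fun p : Int × Int => decide (p.1 < p.2))]
  -- off-diagonal part
  have hoff : F.countP (fun p : Int × Int => decide (p.1 < p.2)) =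
      (PySem.Set.ofList L).countP
        (fun v => decide (2 * v < n ∧ PySem.Set.contains (PySem.Set.ofList L) (n - v))) := by
    rw [List.countP_eq_length_filter, List.countP_eq_length_filter]
    have hperm : (F.filter (fun p : Int × Int => decide (p.1 < p.2))).Perm
        (((PySem.Set.ofList L).filter
          (fun v => decide (2 * v < n ∧ PySem.Set.contains (PySem.Set.ofList L) (n - v)))).map
          (fun v => (v, n - v))) := by
      apply (List.perm_ext_iff_of_nodup (hnd.filter _) ?_).2
      · intro p
        obtain ⟨a, b⟩ := p
        simp only [List.mem_filter, List.mem_map, hmem, pvGood, decide_eq_true_eq,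
          PySem.Set.mem_ofList, PySem.Set.contains_iff]
        constructor
        · rintro ⟨⟨hsum, _, ha, hb, _⟩, hlt⟩
          exact ⟨a, ⟨ha, by omega, by rw [show n - a = b by omega]; exact hb⟩, by simp; omega⟩
        · rintro ⟨v, ⟨hv, h2v, hnv⟩, rfl, rfl⟩
          exact ⟨⟨by omega, by omega, hv, hnv, fun h => by omega⟩, by omega⟩
      · apply List.Nodup.map
        · intro x y hxy
          simpa using congrArg Prod.fst hxy
        · exact (PySem.Set.nodup_ofList L).filter _
    rw [hperm.length_eq, List.length_map]
  -- diagonal part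
  have hdiag : (F.countP (fun p : Int × Int => decide ¬ (decide (p.1 < p.2) = true)) : Int) =
      if PySem.Int.mod n 2 = 0 ∧ 2 ≤ L.count (PySem.Int.floordiv n 2) then 1 else 0 := by
    rw [List.countP_eq_length_filter]
    by_cases hcond : PySem.Int.mod n 2 = 0 ∧ 2 ≤ L.count (PySem.Int.floordiv n 2)
    · obtain ⟨heven, hcnt⟩ := hcond
      have hdvd : (2 : Int) ∣ n := (PySem.Int.mod_eq_zero_iff_dvd n 2).1 heven
      have hfd : PySem.Int.floordiv n 2 * 2 + PySem.Int.mod n 2 = n :=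
        PySem.Int.floordiv_mul_add_mod n 2
      set m := PySem.Int.floordiv n 2 with hm
      have h2m : 2 * m = n := by omega
      have hlen : (F.filter (fun p : Int × Int => decide ¬ (decide (p.1 < p.2) = true))).length = 1 := by
        apply pvSingleton _ (m, m)
        · exact hnd.filter _
        · intro y hy
          obtain ⟨a, b⟩ := y
          simp only [List.mem_filter, hmem, pvGood, decide_eq_true_eq] at hy
          obtain ⟨⟨hsum, hle, _, _, _⟩, hnlt⟩ := hy
          have : a = m := by omega
          have : b = m := by omega
          simp_all
        · simp only [List.mem_filter, hmem, pvGood, decide_eq_true_eq]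
          have hmL : m ∈ L := List.count_pos_iff.1 (by omega)
          exact ⟨⟨by omega, le_refl m, hmL, hmL, fun _ => hcnt⟩, by omega⟩
      rw [hlen, if_pos ⟨heven, hcnt⟩]
      simp
    · have hempty : F.filter (fun p : Int × Int => decide ¬ (decide (p.1 < p.2) = true)) = [] := by
        rw [List.filter_eq_nil_iff]
        intro p hp
        obtain ⟨a, b⟩ := p
        have hg := (hmem (a, b)).1 hp
        obtain ⟨hsum, hle, ha, _, hdg⟩ := hg
        simp only [decide_eq_true_eq, Decidable.not_not]
        by_contra hnlt
        simp at hnlt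
        have hab : a = b := by omega
        have hdvd : (2 : Int) ∣ n := ⟨a, by omega⟩
        have heven : PySem.Int.mod n 2 = 0 := (PySem.Int.mod_eq_zero_iff_dvd n 2).2 hdvd
        have hfd := PySem.Int.floordiv_mul_add_mod n 2
        have hfm : PySem.Int.floordiv n 2 = a := by omega
        have := hdg hab
        exact hcond ⟨heven, by rw [hfm]; omega⟩
      rw [hempty, if_neg hcond]
      simp
  split_ifs with hcond
  · rw [if_pos hcond] at hdiag
    push_cast
    omega
  · rw [if_neg hcond] at hdiag
    push_cast
    omega

-- ===== VERDICT (by name: the statement is the Claim_ definition above) =====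
theorem find_pairs_of_numbers_spec : Claim_equal_find_pairs_of_numbers := by
  intro num_list n _
  unfold Spec_find_pairs_of_numbers find_pairs_of_numbers
  have h := pvInvA n num_list [] PySem.Set.empty (by simp [PySem.Set.empty])
    (by intro p; simp [PySem.Set.empty, pvGood])
  rw [PySem.Set.ofList_nil] at h
  have := pvLen_eq_alt n num_list _ h.1 (by simpa using h.2)
  simpa [PySem.Set.len] using this
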